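-- pv_equiv track=rewrite | github.com/Carol773/GeeksForGeeks | Difficulty: Medium/Check if frequencies can be equal/check-if-frequencies-can-be-equal.py | sameFreq
-- ===== SOURCE A (Python) =====
-- def sameFreq(s):
--     # code here
--     freq={}
--     seen=set()
--
--     for ch in s:
--         if ch not in freq:
--             freq[ch]=1
--         else:
--             freq[ch]+=1
--
--     for k,v in freq.items():
--         seen.add(v)
--
--     arr=list(seen)
--
--     if len(arr)==1:
--         return 1
--     if len(arr)>2:
--         return 0
--     if len(arr)==2:
--         min_freq=min(arr)
--         max_freq=max(arr)
--
--         if (list(freq.values()).count(min_freq)==1 and min_freq==1) or (list(freq.values()).count(max_freq)==1 and max_freq-min_freq==1):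
--             return 1
--         return 0
-- ===== SOURCE B (Python) =====
-- def _uniform(xs):
--     return not xs or all(v == xs[0] for v in xs)
--
-- def sameFreq(s):
--     # simulate removing one occurrence of each distinct character
--     cnt = {}
--     for ch in s:
--         cnt[ch] = cnt.get(ch, 0) + 1
--     vals = list(cnt.values())
--     if _uniform(vals):
--         return 1
--     for f in set(vals):
--         rest = vals.copy()
--         rest.remove(f)
--         if f > 1:
--             rest.append(f - 1)
--         if _uniform(rest):
--             return 1
--     return 0
-- ===== Notes on version B (the rewrite author's own statement) =====
-- stated objective: alternative
-- what changed: A decides by a closed-form arithmetic test on the set of frequency values (min/max/multiplicity); B instead simulates removing one occurrence of each distinct frequency and checks whether the remaining multiset of frequencies becomes uniform.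
-- outside the precondition, e.g. on sameFreq(''): A returns None, B returns 1
import Mathlib
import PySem

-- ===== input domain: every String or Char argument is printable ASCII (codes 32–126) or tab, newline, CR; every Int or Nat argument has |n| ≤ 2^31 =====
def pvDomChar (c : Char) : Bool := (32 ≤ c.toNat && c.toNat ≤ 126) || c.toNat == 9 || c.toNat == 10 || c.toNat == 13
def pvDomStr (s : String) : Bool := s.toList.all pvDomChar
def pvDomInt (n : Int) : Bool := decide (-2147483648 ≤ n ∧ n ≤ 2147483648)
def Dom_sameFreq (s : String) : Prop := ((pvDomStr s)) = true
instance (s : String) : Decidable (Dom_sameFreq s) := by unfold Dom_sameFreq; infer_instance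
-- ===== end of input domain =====

-- B replaces A's arithmetic min/max/multiplicity test on the set of frequency values by a direct
-- simulation: remove one occurrence of each distinct frequency value and check uniformity.

-- ===== PORT A =====
def sameFreq (s : String) : Int :=
  -- freq = {}; for ch in s: freq[ch] = 1 if absent else freq[ch]+1
  let freq := s.toList.foldl (fun d ch =>
      if d.contains ch then d.insert ch (d.getD ch 0 + 1) else d.insert ch 1)
    (PySem.Dict.empty : PySem.Dict Char Int)
  -- seen = set(); for k,v in freq.items(): seen.add(v);  arr = list(seen)
  let arr := freq.items.foldl (fun st p => PySem.Set.add st p.2) (PySem.Set.empty : PySem.Set Int)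
  if arr.length = 1 then 1
  else if 2 < arr.length then 0
  else if arr.length = 2 then
    -- arr is nonempty here, so Python's min/max return; .getD 0 is unreachable
    let minFreq := (PySem.List.min? arr (fun x => x)).getD 0
    let maxFreq := (PySem.List.max? arr (fun x => x)).getD 0
    if (PySem.List.count freq.values minFreq == 1 && minFreq == 1)
        || (PySem.List.count freq.values maxFreq == 1 && maxFreq - minFreq == 1) then 1 else 0
  else 0  -- only arr = [], i.e. s = "": Python falls through returning None; excluded by Pre_

-- ===== PORT B =====
-- _uniform(xs) = not xs or all(v == xs[0] for v in xs)
def uniformB (l : List Int) : Bool :=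
  match l with
  | [] => true
  | x :: _ => l.all (fun v => v == x)

def sameFreq_alt (s : String) : Int :=
  -- cnt = {}; for ch in s: cnt[ch] = cnt.get(ch, 0) + 1
  let cnt := s.toList.foldl (fun d ch => d.insert ch (d.getD ch 0 + 1))
    (PySem.Dict.empty : PySem.Dict Char Int)
  let vals := cnt.values
  if uniformB vals then 1
  else if (PySem.Set.ofList vals).any (fun f =>
      -- rest = vals.copy(); rest.remove(f) — f ∈ set(vals), so remove? is never none; then append f-1 if f > 1
      uniformB (((PySem.List.remove? vals f).getD []) ++ (if 1 < f then [f - 1] else []))) then 1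
  else 0

-- ===== PRECONDITION & SPEC =====
-- Pre_ excludes only the empty string, on which Python's A falls through every branch and returns None (not an int).
def Pre_sameFreq (s : String) : Prop := s.toList ≠ []
instance (s : String) : Decidable (Pre_sameFreq s) := by unfold Pre_sameFreq; infer_instance
def pvWitness_sameFreq : String := "aab"

def Spec_sameFreq (s : String) (out : Int) : Prop := out = sameFreq_alt s
instance (s : String) (out : Int) : Decidable (Spec_sameFreq s out) := by unfold Spec_sameFreq; infer_instance

-- ===== CLAIM (what is proved, stated in full; the proofs are below) =====
def Claim_equal_sameFreq : Prop := ∀ (s : String), Dom_sameFreq s → Pre_sameFreq s → Spec_sameFreq s (sameFreq s)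

-- ===== LEMMAS AND PROOFS =====

def decA (vals : List Int) : Int :=
  let arr := PySem.Set.ofList vals
  if arr.length = 1 then 1
  else if 2 < arr.length then 0
  else if arr.length = 2 then
    let minFreq := (PySem.List.min? arr (fun x => x)).getD 0
    let maxFreq := (PySem.List.max? arr (fun x => x)).getD 0
    if (PySem.List.count vals minFreq == 1 && minFreq == 1)
        || (PySem.List.count vals maxFreq == 1 && maxFreq - minFreq == 1) then 1 else 0
  else 0

def decB (vals : List Int) : Int :=
  if uniformB vals then 1
  else if (PySem.Set.ofList vals).any (fun f =>
      uniformB (((PySem.List.remove? vals f).getD []) ++ (if 1 < f then [f - 1] else []))) then 1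
  else 0

-- the two counting loops build the same dict: A's if/else step equals B's get-based step
lemma countLoop_eq_counter (l : List Char) :
    l.foldl (fun d ch => if d.contains ch then d.insert ch (d.getD ch 0 + 1) else d.insert ch 1)
      (PySem.Dict.empty : PySem.Dict Char Int) = PySem.Dict.counter l := by
  have hstep : ∀ (d : PySem.Dict Char Int) (ch : Char),
      (if d.contains ch then d.insert ch (d.getD ch 0 + 1) else d.insert ch 1) =
        d.insert ch (d.getD ch 0 + 1) := by
    intro d ch
    by_cases h : d.contains ch = true
    · simp [h]
    · rw [if_neg (by simp [h]),
        PySem.Dict.getD_of_not_contains d 0 (by simpa using h)]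
      norm_num
  simp only [hstep]
  exact PySem.Dict.foldl_insert_getD_add_one_eq_counter l

-- A's seen-building loop over items is set(values)
lemma seenLoop_eq_ofList_values (d : PySem.Dict Char Int) :
    d.items.foldl (fun st p => PySem.Set.add st p.2) (PySem.Set.empty : PySem.Set Int)
      = PySem.Set.ofList d.values := by
  rw [PySem.Set.ofList_eq_foldl]
  show _ = (d.items.map (·.2)).foldl PySem.Set.add []
  rw [List.foldl_map]
  rfl

lemma values_counter_eq (l : List Char) :
    (PySem.Dict.counter l).values = (PySem.Set.ofList l).map (fun k => (l.count k : Int)) := by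
  simp [PySem.Dict.values, PySem.Dict.items_counter, List.map_map]

lemma values_counter_ne_nil (l : List Char) (h : l ≠ []) :
    (PySem.Dict.counter l).values ≠ [] := by
  rw [values_counter_eq, ne_eq, List.map_eq_nil_iff]
  intro hz
  cases l with
  | nil => exact h rfl
  | cons x xs =>
    have : x ∈ PySem.Set.ofList (x :: xs) := (PySem.Set.mem_ofList _ x).mpr (by simp)
    rw [hz] at this
    simp at this

lemma values_counter_pos (l : List Char) :
    ∀ v ∈ (PySem.Dict.counter l).values, 1 ≤ v := by
  intro v hv
  rw [values_counter_eq] at hv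
  obtain ⟨k, hk, rfl⟩ := List.mem_map.mp hv
  have : k ∈ l := (PySem.Set.mem_ofList l k).mp hk
  have : 0 < l.count k := List.count_pos_iff.mpr this
  exact_mod_cast this

lemma sameFreq_eq_decA (s : String) :
    sameFreq s = decA ((PySem.Dict.counter s.toList).values) := by
  simp only [sameFreq, decA, countLoop_eq_counter, seenLoop_eq_ofList_values]

lemma alt_eq_decB (s : String) :
    sameFreq_alt s = decB ((PySem.Dict.counter s.toList).values) := by
  simp only [sameFreq_alt, decB, PySem.Dict.foldl_insert_getD_add_one_eq_counter]
  rfl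

lemma uniformB_iff (l : List Int) : uniformB l = true ↔ ∀ x ∈ l, ∀ y ∈ l, x = y := by
  cases l with
  | nil => simp [uniformB]
  | cons a t =>
    simp only [uniformB, List.all_eq_true, beq_iff_eq]
    constructor
    · intro h x hx y hy
      rw [h x hx, h y hy]
    · intro h v hv
      exact h v hv a (List.mem_cons_self ..)

lemma case2_m (vals : List Int) (m M : Int)
    (hmem : ∀ x ∈ vals, x = m ∨ x = M) (hm : m ∈ vals) (hM : M ∈ vals)
    (hlt : m < M) (h1 : 1 ≤ m) :
    uniformB ((vals.erase m) ++ (if 1 < m then [m - 1] else [])) = true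
      ↔ (vals.count m = 1 ∧ m = 1) := by
  rw [uniformB_iff]
  constructor
  · intro hu
    have hM' : M ∈ vals.erase m ++ (if 1 < m then [m - 1] else []) :=
      List.mem_append_left _ ((List.mem_erase_of_ne (by omega)).mpr hM)
    have hm1 : m = 1 := by
      by_contra h
      have h2 : 1 < m := by omega
      have hmem' : (m - 1) ∈ vals.erase m ++ (if 1 < m then [m - 1] else []) := by
        apply List.mem_append_right; simp [h2]
      have := hu _ hM' _ hmem'
      omega
    refine ⟨?_, hm1⟩
    have hpos : 0 < vals.count m := List.count_pos_iff.mpr hm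
    by_contra h
    have h2 : 0 < (vals.erase m).count m := by
      rw [List.count_erase_self]; omega
    have hmm : m ∈ vals.erase m ++ (if 1 < m then [m - 1] else []) :=
      List.mem_append_left _ (List.count_pos_iff.mp h2)
    have := hu _ hmm _ hM'
    omega
  · rintro ⟨hc, hm1⟩
    subst hm1
    intro x hx y hy
    have key : ∀ z, z ∈ (vals.erase 1) ++ (if (1:Int) < 1 then [(1:Int) - 1] else []) → z = M := by
      intro z hz
      simp only [show ¬((1:Int) < 1) by omega, if_false, List.append_nil] at hz
      rcases hmem z (List.mem_of_mem_erase hz) with h | h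
      · exfalso
        have : 0 < (vals.erase 1).count 1 := List.count_pos_iff.mpr (h ▸ hz)
        rw [List.count_erase_self] at this
        omega
      · exact h
    rw [key x hx, key y hy]

lemma case2_M (vals : List Int) (m M : Int)
    (hmem : ∀ x ∈ vals, x = m ∨ x = M) (hm : m ∈ vals) (hM : M ∈ vals)
    (hlt : m < M) (h1 : 1 ≤ m) :
    uniformB ((vals.erase M) ++ (if 1 < M then [M - 1] else [])) = true
      ↔ (vals.count M = 1 ∧ M - m = 1) := by
  have hM2 : 1 < M := by omega
  rw [uniformB_iff]
  simp only [hM2, if_true]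
  constructor
  · intro hu
    have hm' : m ∈ vals.erase M ++ [M - 1] :=
      List.mem_append_left _ ((List.mem_erase_of_ne (by omega)).mpr hm)
    have hM1' : (M - 1) ∈ vals.erase M ++ [M - 1] := by
      apply List.mem_append_right; simp
    have hdiff : M - m = 1 := by
      have := hu _ hm' _ hM1'
      omega
    refine ⟨?_, hdiff⟩
    by_contra h
    have hpos : 0 < vals.count M := List.count_pos_iff.mpr hM
    have h2 : 0 < (vals.erase M).count M := by
      rw [List.count_erase_self]; omega
    have hMM : M ∈ vals.erase M ++ [M - 1] :=
      List.mem_append_left _ (List.count_pos_iff.mp h2)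
    have := hu _ hMM _ hM1'
    omega
  · rintro ⟨hc, hd⟩
    intro x hx y hy
    have key : ∀ z, z ∈ (vals.erase M) ++ [M - 1] → z = m := by
      intro z hz
      rcases List.mem_append.mp hz with hz | hz
      · rcases hmem z (List.mem_of_mem_erase hz) with h | h
        · exact h
        · exfalso
          have : 0 < (vals.erase M).count M := List.count_pos_iff.mpr (h ▸ hz)
          rw [List.count_erase_self] at this
          omega
      · simp at hz; omega
    rw [key x hx, key y hy]

lemma decA_eq_decB (vals : List Int) (hne : vals ≠ []) (hpos : ∀ v ∈ vals, 1 ≤ v) :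
    decA vals = decB vals := by
  have hmemS : ∀ x, x ∈ PySem.Set.ofList vals ↔ x ∈ vals := fun x => PySem.Set.mem_ofList vals x
  have hnd := PySem.Set.nodup_ofList vals
  rcases hS : PySem.Set.ofList vals with _ | ⟨a, _ | ⟨b, _ | ⟨c, t⟩⟩⟩
  all_goals rw [hS] at hmemS hnd
  · -- S = []: impossible
    exact absurd (List.eq_nil_iff_forall_not_mem.mpr fun x hx => by simpa using (hmemS x).mpr hx) hne
  · -- one distinct value: both 1
    have huni : uniformB vals = true := by
      rw [uniformB_iff]
      intro x hx y hy
      have h1 := (hmemS x).mpr hx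
      have h2 := (hmemS y).mpr hy
      simp at h1 h2
      rw [h1, h2]
    simp [decA, decB, hS, huni]
  · -- two distinct values
    have hab : a ≠ b := by simp [List.nodup_cons] at hnd; tauto
    have hav : a ∈ vals := (hmemS a).mp (by simp)
    have hbv : b ∈ vals := (hmemS b).mp (by simp)
    have huni : ¬ uniformB vals = true := by
      rw [uniformB_iff]
      intro h
      exact hab (h a hav b hbv)
    have key : ∀ m M : Int, m ∈ vals → M ∈ vals → m < M → (∀ x ∈ vals, x = m ∨ x = M) →
        ((PySem.List.count vals m == 1 && m == 1) || (PySem.List.count vals M == 1 && M - m == 1))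
        = (uniformB (((PySem.List.remove? vals m).getD []) ++ (if 1 < m then [m - 1] else []))
           || uniformB (((PySem.List.remove? vals M).getD []) ++ (if 1 < M then [M - 1] else []))) := by
      intro m M hm hM hlt hmm
      rw [PySem.List.remove?_eq_some_erase vals m hm, PySem.List.remove?_eq_some_erase vals M hM]
      simp only [Option.getD_some]
      rw [Bool.eq_iff_iff]
      simp only [Bool.or_eq_true, Bool.and_eq_true, beq_iff_eq, PySem.List.count_eq]
      rw [case2_m vals m M hmm hm hM hlt (hpos m hm), case2_M vals m M hmm hm hM hlt (hpos m hm)]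
    simp only [decA, decB, hS]
    rw [if_neg (by simp), if_neg (by simp), if_pos (by simp)]
    rw [PySem.List.min?_id_cons, PySem.List.max?_id_cons]
    simp only [List.foldl_cons, List.foldl_nil, Option.getD_some]
    rw [if_neg huni]
    simp only [List.any_cons, List.any_nil, Bool.or_false]
    rcases lt_trichotomy a b with h | h | h
    · have hmm : ∀ x ∈ vals, x = a ∨ x = b := fun x hx => by simpa using (hmemS x).mpr hx
      simp only [min_eq_left h.le, max_eq_right h.le]
      rw [key a b hav hbv h hmm]
    · exact absurd h hab
    · have hmm : ∀ x ∈ vals, x = b ∨ x = a := fun x hx => by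
        have := (hmemS x).mpr hx
        simp at this
        tauto
      simp only [min_eq_right h.le, max_eq_left h.le]
      rw [key b a hbv hav h hmm, Bool.or_comm]
  · -- at least three distinct values: both 0
    have hab : a ≠ b := by
      have := hnd
      simp [List.nodup_cons] at this
      tauto
    have huni : ¬ uniformB vals = true := by
      rw [uniformB_iff]
      intro h
      exact hab (h a ((hmemS a).mp (by simp)) b ((hmemS b).mp (by simp)))
    have hany : ¬ ((a :: b :: c :: t).any (fun f =>
        uniformB (((PySem.List.remove? vals f).getD []) ++ (if 1 < f then [f - 1] else []))) = true) := by
      intro h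
      obtain ⟨f, hf, hp⟩ := List.any_eq_true.mp h
      have hfv : f ∈ vals := (hmemS f).mp hf
      rw [PySem.List.remove?_eq_some_erase vals f hfv, Option.getD_some] at hp
      -- find two distinct values other than f
      obtain ⟨x, y, hxy, hx, hy⟩ : ∃ x y, x ≠ y ∧ x ∈ vals.erase f ∧ y ∈ vals.erase f := by
        have hac : a ≠ c := by simp [List.nodup_cons] at hnd; tauto
        have hbc : b ≠ c := by simp [List.nodup_cons] at hnd; tauto
        have hav : a ∈ vals := (hmemS a).mp (by simp)
        have hbv : b ∈ vals := (hmemS b).mp (by simp)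
        have hcv : c ∈ vals := (hmemS c).mp (by simp)
        by_cases hfa : f = a
        · exact ⟨b, c, hbc, (List.mem_erase_of_ne (by omega)).mpr hbv,
            (List.mem_erase_of_ne (by omega)).mpr hcv⟩
        · by_cases hfb : f = b
          · exact ⟨a, c, hac, (List.mem_erase_of_ne (by omega)).mpr hav,
              (List.mem_erase_of_ne (by omega)).mpr hcv⟩
          · exact ⟨a, b, hab, (List.mem_erase_of_ne (by omega)).mpr hav,
              (List.mem_erase_of_ne (by omega)).mpr hbv⟩
      have := (uniformB_iff _).mp hp x (List.mem_append_left _ hx) y (List.mem_append_left _ hy)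
      exact hxy this
    simp only [decA, decB, hS]
    rw [if_neg (by simp), if_pos (by simp), if_neg huni, if_neg hany]


-- ===== VERDICT (by name: the statement is the Claim_ definition above) =====
theorem sameFreq_spec : Claim_equal_sameFreq := by
  intro s _ hpre
  unfold Spec_sameFreq
  rw [sameFreq_eq_decA, alt_eq_decB]
  exact decA_eq_decB _ (values_counter_ne_nil _ hpre) (values_counter_pos _)
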